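-- pv_equiv track=rewrite | github.com/Hurricane0017/Capital_One_Hackathon | LLM_Server/soil_agent.py | _get_fertilizer_priorities
-- ===== SOURCE A (Python) =====
-- from typing import Dict, List, Any, Optional
--
-- def _get_fertilizer_priorities(soil_data: Dict[str, Any]) -> List[str]:
--     """Get fertilizer priorities based on soil nutrient status."""
--     deficient = soil_data.get('nutrients_deficient_in', [])
--     priorities = []
--
--     # Priority order for nutrient management
--     nutrient_priority = ['nitrogen', 'phosphorus', 'potassium', 'calcium', 'sulfur', 'zinc']
--
--     for nutrient in nutrient_priority:
--         if nutrient in deficient: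
--             priorities.append(nutrient)
--
--     # Add any other deficient nutrients
--     for nutrient in deficient:
--         if nutrient not in priorities:
--             priorities.append(nutrient)
--
--     return priorities[:5]  # Top 5 priorities
-- ===== SOURCE B (Python) =====
-- def _get_fertilizer_priorities(soil_data):
--     """Get fertilizer priorities based on soil nutrient status."""
--     deficient = soil_data.get('nutrients_deficient_in', [])
--
--     nutrient_priority = ['nitrogen', 'phosphorus', 'potassium', 'calcium', 'sulfur', 'zinc']
--     rank = {n: i for i, n in enumerate(nutrient_priority)}
--
--     # Dedup preserving first occurrence, then stably sort: known nutrients in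
--     # priority order, unknown ones after them in original order.
--     seen = list(dict.fromkeys(deficient))
--     seen.sort(key=lambda n: rank.get(n, len(nutrient_priority)))
--     return seen[:5]
-- ===== Notes on version B (the rewrite author's own statement) =====
-- stated objective: idiomatic
-- what changed: Replaces A's two sequential filter passes (scan priority list with 'in deficient', then scan deficient with 'in priorities') by an ordered dedup plus one stable sort keyed by a rank table with a sentinel rank for unknown nutrients.
import Mathlib
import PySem

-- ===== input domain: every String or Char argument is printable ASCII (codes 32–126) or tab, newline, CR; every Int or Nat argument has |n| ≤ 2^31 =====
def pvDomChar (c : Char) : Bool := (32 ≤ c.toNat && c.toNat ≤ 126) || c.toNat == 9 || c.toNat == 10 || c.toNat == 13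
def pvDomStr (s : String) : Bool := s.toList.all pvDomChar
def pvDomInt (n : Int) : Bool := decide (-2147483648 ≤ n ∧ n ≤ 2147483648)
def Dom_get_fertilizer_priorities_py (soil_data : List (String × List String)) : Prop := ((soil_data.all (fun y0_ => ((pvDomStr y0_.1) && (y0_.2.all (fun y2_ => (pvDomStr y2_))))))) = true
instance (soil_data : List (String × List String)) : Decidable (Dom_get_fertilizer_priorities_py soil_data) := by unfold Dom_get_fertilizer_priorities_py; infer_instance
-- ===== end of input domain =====

-- B replaces A's two sequential filter passes by an ordered dedup plus one stable sort
-- keyed by a rank table (sentinel rank for unknown nutrients); same return value, proved below.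

-- ===== PORT A =====
-- the priority list literal shared by both Pythons
def pvPriority : List String := ["nitrogen", "phosphorus", "potassium", "calcium", "sulfur", "zinc"]

def get_fertilizer_priorities_py (soil_data : List (String × List String)) : List String :=
  let deficient := PySem.Dict.getD (PySem.Dict.mk soil_data) "nutrients_deficient_in" []
  -- for nutrient in nutrient_priority: if nutrient in deficient: priorities.append(nutrient)
  let priorities : List String :=
    pvPriority.foldl (fun acc nutrient => if nutrient ∈ deficient then acc ++ [nutrient] else acc) []
  -- for nutrient in deficient: if nutrient not in priorities: priorities.append(nutrient)
  let priorities :=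
    deficient.foldl (fun acc nutrient => if nutrient ∉ acc then acc ++ [nutrient] else acc) priorities
  PySem.List.slice priorities none (some 5)

-- ===== PORT B =====
def get_fertilizer_priorities_py_alt (soil_data : List (String × List String)) : List String :=
  let deficient := PySem.Dict.getD (PySem.Dict.mk soil_data) "nutrients_deficient_in" []
  -- rank = {n: i for i, n in enumerate(nutrient_priority)}
  let rank : PySem.Dict String Int :=
    (PySem.List.enumerate pvPriority).foldl (fun d p => d.insert p.2 p.1) (PySem.Dict.mk [])
  -- seen = list(dict.fromkeys(deficient))
  let seen := PySem.List.dedup deficient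
  -- seen.sort(key=lambda n: rank.get(n, len(nutrient_priority)))  (stable sort)
  let seen := PySem.List.sorted seen (fun n => PySem.Dict.getD rank n (pvPriority.length : Int))
  PySem.List.slice seen none (some 5)

-- ===== PRECONDITION & SPEC =====
def Spec_get_fertilizer_priorities_py (soil_data : List (String × List String)) (out : List String) : Prop := out = get_fertilizer_priorities_py_alt soil_data
instance (soil_data : List (String × List String)) (out : List String) : Decidable (Spec_get_fertilizer_priorities_py soil_data out) := by unfold Spec_get_fertilizer_priorities_py; infer_instance

-- ===== CLAIM (what is proved, stated in full; the proofs are below) =====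
def Claim_equal_get_fertilizer_priorities_py : Prop := ∀ (soil_data : List (String × List String)), Dom_get_fertilizer_priorities_py soil_data → Spec_get_fertilizer_priorities_py soil_data (get_fertilizer_priorities_py soil_data)

-- ===== LEMMAS AND PROOFS =====

-- B's key function, named for the proofs
def pvKey (n : String) : Int :=
  PySem.Dict.getD
    ((PySem.List.enumerate pvPriority).foldl (fun d p => d.insert p.2 p.1) (PySem.Dict.mk []))
    n (pvPriority.length : Int)

lemma pvKey_of_not_mem {n : String} (h : n ∉ pvPriority) : pvKey n = 6 := by
  simp only [pvPriority, List.mem_cons, List.not_mem_nil, or_false, not_or] at h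
  obtain ⟨h1, h2, h3, h4, h5, h6⟩ := h
  simp [pvKey, pvPriority, PySem.List.enumerate, PySem.Dict.getD, PySem.Dict.get?,
    PySem.Dict.insert, Ne.symm h1, Ne.symm h2, Ne.symm h3, Ne.symm h4, Ne.symm h5, Ne.symm h6]

lemma pvKey_le (n : String) : pvKey n ≤ 6 := by
  by_cases h : n ∈ pvPriority
  · simp only [pvPriority, List.mem_cons, List.not_mem_nil, or_false] at h
    rcases h with rfl | rfl | rfl | rfl | rfl | rfl <;> decide
  · exact le_of_eq (pvKey_of_not_mem h)

lemma pvKey_of_mem {n : String} (h : n ∈ pvPriority) : pvKey n < 6 := by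
  simp only [pvPriority, List.mem_cons, List.not_mem_nil, or_false] at h
  rcases h with rfl | rfl | rfl | rfl | rfl | rfl <;> decide

lemma pvKey_pairwise : pvPriority.Pairwise (fun a b => pvKey a < pvKey b) := by decide

-- insertBy puts x in front when it sorts before everything present
lemma insertBy_all_before (before : String → String → Bool) (x : String) (ys : List String)
    (h : ∀ y ∈ ys, before x y = true) :
    PySem.List.insertBy before x ys = x :: ys := by
  cases ys with
  | nil => rfl
  | cons y t => simp [PySem.List.insertBy, h y List.mem_cons_self]

-- inserting a priority nutrient x into "known part ++ unknown part" lands it at its rank slot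
lemma pv_ins (k : String → Int) (x : String) (S U : List String)
    (hU : ∀ u ∈ U, k x < k u) (hxS : x ∉ S) :
    ∀ P : List String, P.Pairwise (fun a b => k a < k b) → x ∈ P →
      PySem.List.insertBy (fun a b => decide (k a < k b)) x
        (P.filter (fun p => decide (p ∈ S)) ++ U)
      = P.filter (fun p => decide (p ∈ S ++ [x])) ++ U := by
  intro P
  induction P with
  | nil => intro _ hx; exact absurd hx List.not_mem_nil
  | cons p P' ih =>
    intro hpw hx
    have hhead : ∀ y ∈ P', k p < k y := (List.pairwise_cons.mp hpw).1
    have hpw' := (List.pairwise_cons.mp hpw).2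
    by_cases hpx : p = x
    · subst hpx
      have hPS : P'.filter (fun q => decide (q ∈ S ++ [p])) = P'.filter (fun q => decide (q ∈ S)) := by
        refine List.filter_congr ?_
        intro y hy
        have hne : y ≠ p := fun h => absurd (hhead y hy) (by rw [h]; exact lt_irrefl _)
        simp [List.mem_append, hne]
      have hall : ∀ y ∈ P'.filter (fun q => decide (q ∈ S)) ++ U,
          (fun a b => decide (k a < k b)) p y = true := by
        intro y hy
        rcases List.mem_append.mp hy with hy | hy
        · exact decide_eq_true (hhead y (List.mem_of_mem_filter hy))
        · exact decide_eq_true (hU y hy)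
      have hfilter : (p :: P').filter (fun q => decide (q ∈ S)) = P'.filter (fun q => decide (q ∈ S)) := by
        simp [hxS]
      have hhead2 : (p :: P').filter (fun q => decide (q ∈ S ++ [p]))
          = p :: P'.filter (fun q => decide (q ∈ S ++ [p])) := by
        simp
      rw [hfilter, insertBy_all_before _ _ _ hall, hhead2, hPS, List.cons_append]
    · have hxP' : x ∈ P' := by
        rcases List.mem_cons.mp hx with h | h
        · exact absurd h.symm hpx
        · exact h
      have hkpx : k p < k x := hhead x hxP'
      by_cases hpS : p ∈ S
      · have hmem : p ∈ S ++ [x] := List.mem_append.mpr (Or.inl hpS)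
        simp only [List.filter_cons, decide_eq_true_eq, hpS, if_pos, hmem, List.cons_append]
        rw [PySem.List.insertBy]
        have hdec : decide (k x < k p) = false := by
          simp [not_lt.mpr (le_of_lt hkpx)]
        simp only [hdec, Bool.false_eq_true, if_false, ih hpw' hxP']
      · have hmem : p ∉ S ++ [x] := by
          simp only [List.mem_append, List.mem_singleton, not_or]
          exact ⟨hpS, hpx⟩
        simp only [List.filter_cons, decide_eq_true_eq, hpS, hmem, if_false]
        exact ih hpw' hxP'

-- stable sort by such a key = known priorities in priority order ++ unknowns in original order
lemma pv_sorted_split (k : String → Int) (P : List String)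
    (hpw : P.Pairwise (fun a b => k a < k b))
    (hmax : ∀ n, n ∉ P → ∀ m, k m ≤ k n)
    (hlt : ∀ x ∈ P, ∀ u, u ∉ P → k x < k u) :
    ∀ S : List String, S.Nodup →
      PySem.List.sorted S k
        = P.filter (fun p => decide (p ∈ S)) ++ S.filter (fun n => decide (n ∉ P)) := by
  intro S
  induction S using List.reverseRecOn with
  | nil => intro _; simp [PySem.List.sorted]
  | append_singleton S x ih =>
    intro hnd
    have hS : S.Nodup := (List.nodup_append.mp hnd).1
    have hxS : x ∉ S := by
      intro hx
      exact List.disjoint_of_nodup_append hnd hx (List.mem_singleton.mpr rfl)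
    have hstep : PySem.List.sorted (S ++ [x]) k
        = PySem.List.insertBy (fun a b => decide (k a < k b)) x (PySem.List.sorted S k) := by
      rw [PySem.List.sorted_eq_foldl_insertBy, PySem.List.sorted_eq_foldl_insertBy,
        List.foldl_append]
      rfl
    rw [hstep, ih hS]
    by_cases hxP : x ∈ P
    · have h1 : (S ++ [x]).filter (fun n => decide (n ∉ P)) = S.filter (fun n => decide (n ∉ P)) := by
        simp [List.filter_append, hxP]
      rw [h1,
        pv_ins k x S (S.filter (fun n => decide (n ∉ P)))
          (fun u hu => hlt x hxP u (by simpa using List.of_mem_filter hu)) hxS P hpw hxP]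
    · have hall : ∀ y ∈ P.filter (fun p => decide (p ∈ S)) ++ S.filter (fun n => decide (n ∉ P)),
          (fun a b => decide (k a < k b)) x y = false := by
        intro y hy
        simp [not_lt.mpr (hmax x hxP y)]
      rw [PySem.List.insertBy_of_forall_not_before _ _ _ hall]
      have h2 : P.filter (fun p => decide (p ∈ S ++ [x])) = P.filter (fun p => decide (p ∈ S)) := by
        refine List.filter_congr ?_
        intro p hp
        have hne : p ≠ x := fun h => hxP (h ▸ hp)
        simp [List.mem_append, hne]
      rw [h2]
      simp [List.filter_append, hxP]

-- A's first loop collects the priority nutrients present in `deficient`, in priority order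
lemma pv_loop1 (D : List String) :
    ∀ (P acc : List String),
      P.foldl (fun acc n => if n ∈ D then acc ++ [n] else acc) acc
        = acc ++ P.filter (fun p => decide (p ∈ D)) := by
  intro P
  induction P with
  | nil => intro acc; simp
  | cons p P' ih =>
    intro acc
    by_cases hp : p ∈ D
    · simp [List.foldl_cons, hp, ih]
    · simp [List.foldl_cons, hp, ih]

-- A's second loop appends the first occurrences of deficient nutrients not already present
lemma pv_loop2 (D : List String) :
    ∀ init : List String,
      D.foldl (fun acc n => if n ∉ acc then acc ++ [n] else acc) init
        = init ++ (PySem.List.dedup D).filter (fun n => decide (n ∉ init)) := by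
  induction D using List.reverseRecOn with
  | nil => intro init; simp [PySem.List.dedup, PySem.Set.ofList]
  | append_singleton D x ih =>
    intro init
    rw [List.foldl_append, List.foldl_cons, List.foldl_nil, ih init]
    have hded : PySem.List.dedup (D ++ [x])
        = if x ∈ D then PySem.List.dedup D else PySem.List.dedup D ++ [x] := by
      rw [PySem.List.dedup_eq_ofList, PySem.Set.ofList_eq_foldl, List.foldl_append,
        List.foldl_cons, List.foldl_nil, ← PySem.Set.ofList_eq_foldl,
        ← PySem.List.dedup_eq_ofList]
      by_cases hx : x ∈ D
      · simp [PySem.Set.add, PySem.Set.contains, hx]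
      · simp [PySem.Set.add, PySem.Set.contains, hx]
    rw [hded]
    by_cases hxD : x ∈ D
    · simp [hxD]
    · have hxd : x ∉ PySem.List.dedup D := fun h => hxD ((PySem.List.mem_dedup D x).mp h)
      by_cases hxi : x ∈ init
      · simp [hxD, List.filter_append, hxi]
      · have hxacc : x ∉ init ++ (PySem.List.dedup D).filter (fun n => decide (n ∉ init)) := by
          simp only [List.mem_append, not_or]
          exact ⟨hxi, fun h => hxd (List.mem_of_mem_filter h)⟩
        simp [hxD, List.filter_append, hxi]

-- the unsliced lists agree, for any `deficient` list D
lemma pv_main (D : List String) :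
    (pvPriority.foldl (fun acc n => if n ∈ D then acc ++ [n] else acc) []).append
        ((PySem.List.dedup D).filter
          (fun n => decide (n ∉ pvPriority.foldl (fun acc n => if n ∈ D then acc ++ [n] else acc) [])))
      = PySem.List.sorted (PySem.List.dedup D) pvKey := by
  rw [pv_loop1 D pvPriority []]
  rw [pv_sorted_split pvKey pvPriority pvKey_pairwise
    (fun n hn m => (pvKey_of_not_mem hn) ▸ pvKey_le m)
    (fun x hx u hu => (pvKey_of_not_mem hu) ▸ pvKey_of_mem hx)
    (PySem.List.dedup D) (PySem.List.nodup_dedup D)]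
  simp only [List.nil_append, List.append_eq]
  have hF : pvPriority.filter (fun p => decide (p ∈ D))
      = pvPriority.filter (fun p => decide (p ∈ PySem.List.dedup D)) := by
    refine List.filter_congr ?_
    intro p _
    simp
  have hU : (PySem.List.dedup D).filter
        (fun n => decide (n ∉ pvPriority.filter (fun p => decide (p ∈ D))))
      = (PySem.List.dedup D).filter (fun n => decide (n ∉ pvPriority)) := by
    refine List.filter_congr ?_
    intro n hn
    have hnD : n ∈ D := (PySem.List.mem_dedup D n).mp hn
    simp [List.mem_filter, hnD]
  congr 1

-- ===== VERDICT (by name: the statement is the Claim_ definition above) =====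
theorem get_fertilizer_priorities_py_spec : Claim_equal_get_fertilizer_priorities_py := by
  intro soil_data _
  unfold Spec_get_fertilizer_priorities_py
  unfold get_fertilizer_priorities_py get_fertilizer_priorities_py_alt
  simp only []
  generalize (PySem.Dict.getD (PySem.Dict.mk soil_data) "nutrients_deficient_in" ([] : List String)) = D
  have hkey : (fun n => PySem.Dict.getD
      ((PySem.List.enumerate pvPriority).foldl (fun d p => d.insert p.2 p.1) (PySem.Dict.mk []))
      n (pvPriority.length : Int)) = pvKey := rfl
  rw [pv_loop2 D, hkey]
  have := pv_main D
  simp only [List.append_eq] at this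
  rw [this]
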